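-- pv_equiv track=rewrite | github.com/mikemak7/Inferno | src/inferno/utils/formatting.py | format_findings_table
-- ===== SOURCE A (Python) =====
-- from typing import Any
--
-- def format_findings_table(findings: list[dict[str, Any]]) -> str:
--     """
--     Format findings as a simple table.
--
--     Args:
--         findings: List of finding dictionaries.
--
--     Returns:
--         Table-formatted string.
--     """
--     if not findings:
--         return "No findings."
--
--     # Sort by severity
--     severity_order = {"critical": 0, "high": 1, "medium": 2, "low": 3, "info": 4}
--     sorted_findings = sorted(
--         findings,
--         key=lambda f: severity_order.get(f.get("severity", "").lower(), 5),
--     )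
--
--     lines = [
--         "=" * 60,
--         "FINDINGS SUMMARY",
--         "=" * 60,
--     ]
--
--     for finding in sorted_findings:
--         severity = finding.get("severity", "?").upper()[:4]
--         name = finding.get("name", finding.get("type", "Unknown"))[:40]
--         location = finding.get("location", "-")[:20]
--         lines.append(f"[{severity:4}] {name:40} @ {location}")
--
--     lines.append("=" * 60)
--     lines.append(f"Total: {len(findings)} findings")
--
--     return "\n".join(lines)
-- ===== SOURCE B (Python) =====
-- def format_findings_table(findings: list) -> str:
--     """Bucket the findings by severity index (stable counting sort) instead of
--     calling sorted(), then emit the table frame around one joined body string."""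
--     if not findings:
--         return "No findings."
--
--     severities = ("critical", "high", "medium", "low", "info")
--     buckets = [[], [], [], [], [], []]
--     for f in findings:
--         s = f.get("severity", "").lower()
--         buckets[severities.index(s) if s in severities else 5].append(f)
--
--     rows = []
--     for bucket in buckets:
--         for f in bucket:
--             sev = f.get("severity", "?").upper()[:4]
--             name = f.get("name", f.get("type", "Unknown"))[:40]
--             loc = f.get("location", "-")[:20]
--             rows.append(f"[{sev:<4}] {name:<40} @ {loc}")
--
--     bar = "=" * 60
--     body = "\n".join(rows)
--     return f"{bar}\nFINDINGS SUMMARY\n{bar}\n{body}\n{bar}\nTotal: {len(findings)} findings"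
-- ===== Notes on version B (the rewrite author's own statement) =====
-- stated objective: alternative
-- what changed: Replaces sorted(findings, key=...) with a stable one-pass bucket (counting) sort into six severity buckets, and builds the table frame around one joined body string instead of appending every line to a list.
import Mathlib
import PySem

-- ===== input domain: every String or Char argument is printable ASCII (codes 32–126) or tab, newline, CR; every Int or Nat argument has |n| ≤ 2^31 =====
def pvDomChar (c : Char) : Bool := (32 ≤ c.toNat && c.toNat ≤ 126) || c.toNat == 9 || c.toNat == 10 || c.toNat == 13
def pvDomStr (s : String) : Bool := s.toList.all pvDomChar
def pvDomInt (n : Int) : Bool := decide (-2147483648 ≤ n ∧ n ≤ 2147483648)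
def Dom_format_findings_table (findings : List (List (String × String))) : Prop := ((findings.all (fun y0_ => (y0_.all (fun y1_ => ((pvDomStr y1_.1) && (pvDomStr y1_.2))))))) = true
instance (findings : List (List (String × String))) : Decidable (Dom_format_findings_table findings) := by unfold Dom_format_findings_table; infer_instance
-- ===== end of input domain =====

-- B replaces A's sorted(..., key=...) call by a stable one-pass bucket (counting) sort over the
-- six known severity indices and builds the frame around one joined body string (objective: alternative).

-- ===== PORT A =====

-- hand port of the f-string width spec `{s:4}` / `{s:<40}` on a str: left-justify, pad with spaces (exact)
def fftPad (cs : List Char) (w : Nat) : List Char := cs ++ List.replicate (w - cs.length) ' '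

def fftA_sevOrder : PySem.Dict String Int :=
  ⟨[("critical", 0), ("high", 1), ("medium", 2), ("low", 3), ("info", 4)]⟩

-- the sort key: severity_order.get(f.get("severity", "").lower(), 5)
def fftA_key (f : List (String × String)) : Int :=
  PySem.Dict.getD fftA_sevOrder (PySem.Str.lower (PySem.Dict.getD ⟨f⟩ "severity" "")) 5

-- body of A's row loop: f"[{severity:4}] {name:40} @ {location}"
def fftA_row (f : List (String × String)) : List Char :=
  let severity := PySem.Chars.slice (PySem.Str.upper (PySem.Dict.getD ⟨f⟩ "severity" "?")).toList none (some 4)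
  let name := PySem.Chars.slice (PySem.Dict.getD ⟨f⟩ "name" (PySem.Dict.getD ⟨f⟩ "type" "Unknown")).toList none (some 40)
  let location := PySem.Chars.slice (PySem.Dict.getD ⟨f⟩ "location" "-").toList none (some 20)
  '[' :: (fftPad severity 4 ++ [']', ' '] ++ fftPad name 40 ++ [' ', '@', ' '] ++ location)

def format_findings_table (findings : List (List (String × String))) : String :=
  match findings with
  | [] => "No findings."
  | _ =>
    let sorted_findings := PySem.List.sorted findings fftA_key false
    let lines : List (List Char) :=
      [List.replicate 60 '=', "FINDINGS SUMMARY".toList, List.replicate 60 '=']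
    let lines := sorted_findings.foldl (fun acc finding => acc ++ [fftA_row finding]) lines
    let lines := lines ++ [List.replicate 60 '=']
    let lines := lines ++ ["Total: ".toList ++ PySem.Int.toChars (findings.length : Int) ++ " findings".toList]
    String.ofList (PySem.Chars.join ['\n'] lines)

-- ===== PORT B =====

def fftB_sevs : List String := ["critical", "high", "medium", "low", "info"]

-- severities.index(s) if s in severities else 5  (s guarded to be a member, so index? cannot miss)
def fftB_idxOf (s : String) : Nat :=
  if s ∈ fftB_sevs then (PySem.List.index? fftB_sevs s).getD 5 else 5

def fftB_idx (f : List (String × String)) : Nat :=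
  fftB_idxOf (PySem.Str.lower (PySem.Dict.getD ⟨f⟩ "severity" ""))

-- buckets[idx].append(f): in-place append to the idx-th of the six buckets
def fftB_push (buckets : List (List (List (String × String)))) (f : List (String × String)) :
    List (List (List (String × String))) :=
  buckets.modify (fftB_idx f) (fun bucket => bucket ++ [f])

-- hand port of `str` width formatting `{s:<4}` / `{s:<40}`: left-justify, pad with spaces (exact)
def fftB_pad (cs : List Char) (w : Nat) : List Char := cs ++ List.replicate (w - cs.length) ' '

-- f"[{sev:<4}] {name:<40} @ {loc}"
def fftB_row (f : List (String × String)) : List Char :=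
  let sev := PySem.Chars.slice (PySem.Str.upper (PySem.Dict.getD ⟨f⟩ "severity" "?")).toList none (some 4)
  let name := PySem.Chars.slice (PySem.Dict.getD ⟨f⟩ "name" (PySem.Dict.getD ⟨f⟩ "type" "Unknown")).toList none (some 40)
  let loc := PySem.Chars.slice (PySem.Dict.getD ⟨f⟩ "location" "-").toList none (some 20)
  '[' :: (fftB_pad sev 4 ++ [']', ' '] ++ fftB_pad name 40 ++ [' ', '@', ' '] ++ loc)

def format_findings_table_alt (findings : List (List (String × String))) : String :=
  if findings.isEmpty then "No findings."
  else
    let buckets := findings.foldl fftB_push [[], [], [], [], [], []]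
    let rows := buckets.flatMap (fun bucket => bucket.map fftB_row)
    let bar := List.replicate 60 '='
    let body := PySem.Chars.join ['\n'] rows
    String.ofList (bar ++ '\n' :: "FINDINGS SUMMARY".toList ++ '\n' :: bar ++ '\n' :: body ++
                   '\n' :: bar ++ '\n' :: "Total: ".toList ++
                   PySem.Int.toChars (findings.length : Int) ++ " findings".toList)

-- ===== PRECONDITION & SPEC =====
def Spec_format_findings_table (findings : List (List (String × String))) (out : String) : Prop := out = format_findings_table_alt findings
instance (findings : List (List (String × String))) (out : String) : Decidable (Spec_format_findings_table findings out) := by unfold Spec_format_findings_table; infer_instance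

-- ===== CLAIM (what is proved, stated in full; the proofs are below) =====
def Claim_equal_format_findings_table : Prop := ∀ (findings : List (List (String × String))), Dom_format_findings_table findings → Spec_format_findings_table findings (format_findings_table findings)

-- ===== LEMMAS AND PROOFS =====

lemma fft_key_eq_idxOf (s : String) :
    PySem.Dict.getD fftA_sevOrder s 5 = (fftB_idxOf s : Int) := by
  by_cases h0 : s = "critical"; · subst h0; decide
  by_cases h1 : s = "high"; · subst h1; decide
  by_cases h2 : s = "medium"; · subst h2; decide
  by_cases h3 : s = "low"; · subst h3; decide
  by_cases h4 : s = "info"; · subst h4; decide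
  simp [fftA_sevOrder, PySem.Dict.getD_eq_get?_getD, PySem.Dict.get?,
    fftB_idxOf, fftB_sevs, Ne.symm h0, Ne.symm h1, Ne.symm h2, Ne.symm h3, Ne.symm h4,
    h0, h1, h2, h3, h4]

lemma fft_key_eq (f : List (String × String)) : fftA_key f = (fftB_idx f : Int) := by
  unfold fftA_key fftB_idx
  exact fft_key_eq_idxOf _

lemma fft_idx_le (f : List (String × String)) : fftB_idx f ≤ 5 := by
  unfold fftB_idx fftB_idxOf
  split
  · cases h : PySem.List.index? fftB_sevs (PySem.Str.lower (PySem.Dict.getD ⟨f⟩ "severity" "")) with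
    | none => simp
    | some k =>
      obtain ⟨pre, suf, hx, hk, -⟩ := (PySem.List.index?_eq_some_iff _ _ _).mp h
      have hlen : fftB_sevs.length = 5 := rfl
      rw [hx] at hlen
      simp at hlen
      simp [Option.getD]
      omega
  · exact le_refl 5

lemma fft_insertBy_skip {a : Type} (before : a → a → Bool) (x : a) (l r : List a)
    (hl : ∀ y ∈ l, before x y = false) :
    PySem.List.insertBy before x (l ++ r) = l ++ PySem.List.insertBy before x r := by
  induction l with
  | nil => simp
  | cons c t ih =>
    simp only [List.cons_append, PySem.List.insertBy, hl c (by simp)]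
    simp only [Bool.false_eq_true, if_false]
    rw [ih (fun y hy => hl y (by simp [hy]))]

lemma fft_insertBy_front {a : Type} (before : a → a → Bool) (x : a) (r : List a)
    (hr : ∀ y ∈ r, before x y = true) :
    PySem.List.insertBy before x r = x :: r := by
  cases r with
  | nil => rfl
  | cons c t => simp [PySem.List.insertBy, hr c (by simp)]

lemma fft_pure_append {b : List (List (String × String))} {i : Nat}
    (hb : ∀ y ∈ b, fftB_idx y = i) {x : List (String × String)} (hx : fftB_idx x = i) :
    ∀ y ∈ b ++ [x], fftB_idx y = i := by
  intro y hy
  rcases List.mem_append.mp hy with h | h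
  · exact hb y h
  · rw [List.mem_singleton] at h
    subst h
    exact hx

set_option maxHeartbeats 1000000 in
-- one insertion into the concatenation of the six pure buckets lands at the end of its own bucket
lemma fft_insert_concat (b0 b1 b2 b3 b4 b5 : List (List (String × String)))
    (x : List (String × String))
    (h0 : ∀ y ∈ b0, fftB_idx y = 0) (h1 : ∀ y ∈ b1, fftB_idx y = 1)
    (h2 : ∀ y ∈ b2, fftB_idx y = 2) (h3 : ∀ y ∈ b3, fftB_idx y = 3)
    (h4 : ∀ y ∈ b4, fftB_idx y = 4) (h5 : ∀ y ∈ b5, fftB_idx y = 5) :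
    PySem.List.insertBy (fun a c => decide (fftA_key a < fftA_key c)) x
      ([b0, b1, b2, b3, b4, b5].flatten) =
    (fftB_push [b0, b1, b2, b3, b4, b5] x).flatten := by
  have hle := fft_idx_le x
  have hskip : ∀ y : List (String × String), fftB_idx y ≤ fftB_idx x →
      decide (fftA_key x < fftA_key y) = false := by
    intro y hy
    simp [fft_key_eq]
    exact_mod_cast hy
  have hfront : ∀ y : List (String × String), fftB_idx x < fftB_idx y →
      decide (fftA_key x < fftA_key y) = true := by
    intro y hy
    simp [fft_key_eq]
    exact_mod_cast hy
  have hfl : [b0, b1, b2, b3, b4, b5].flatten = b0 ++ (b1 ++ (b2 ++ (b3 ++ (b4 ++ b5)))) := by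
    simp
  by_cases e0 : fftB_idx x = 0
  · have hp : fftB_push [b0, b1, b2, b3, b4, b5] x = [b0 ++ [x], b1, b2, b3, b4, b5] := by
      simp [fftB_push, e0, List.modify]
    rw [hp, hfl]
    rw [fft_insertBy_skip _ _ b0 _ (fun y hy => hskip y (by rw [h0 y hy, e0])),
        fft_insertBy_front _ _ _ (fun y hy => hfront y (by
          rw [e0]
          simp only [List.mem_append] at hy
          rcases hy with hy | hy | hy | hy | hy
          · rw [h1 y hy]; omega
          · rw [h2 y hy]; omega
          · rw [h3 y hy]; omega
          · rw [h4 y hy]; omega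
          · rw [h5 y hy]; omega))]
    simp
  by_cases e1 : fftB_idx x = 1
  · have hp : fftB_push [b0, b1, b2, b3, b4, b5] x = [b0, b1 ++ [x], b2, b3, b4, b5] := by
      simp [fftB_push, e1, List.modify]
    rw [hp, hfl]
    rw [fft_insertBy_skip _ _ b0 _ (fun y hy => hskip y (by rw [h0 y hy, e1]; omega)),
        fft_insertBy_skip _ _ b1 _ (fun y hy => hskip y (by rw [h1 y hy, e1])),
        fft_insertBy_front _ _ _ (fun y hy => hfront y (by
          rw [e1]
          simp only [List.mem_append] at hy
          rcases hy with hy | hy | hy | hy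
          · rw [h2 y hy]; omega
          · rw [h3 y hy]; omega
          · rw [h4 y hy]; omega
          · rw [h5 y hy]; omega))]
    simp
  by_cases e2 : fftB_idx x = 2
  · have hp : fftB_push [b0, b1, b2, b3, b4, b5] x = [b0, b1, b2 ++ [x], b3, b4, b5] := by
      simp [fftB_push, e2, List.modify]
    rw [hp, hfl]
    rw [fft_insertBy_skip _ _ b0 _ (fun y hy => hskip y (by rw [h0 y hy, e2]; omega)),
        fft_insertBy_skip _ _ b1 _ (fun y hy => hskip y (by rw [h1 y hy, e2]; omega)),
        fft_insertBy_skip _ _ b2 _ (fun y hy => hskip y (by rw [h2 y hy, e2])),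
        fft_insertBy_front _ _ _ (fun y hy => hfront y (by
          rw [e2]
          simp only [List.mem_append] at hy
          rcases hy with hy | hy | hy
          · rw [h3 y hy]; omega
          · rw [h4 y hy]; omega
          · rw [h5 y hy]; omega))]
    simp
  by_cases e3 : fftB_idx x = 3
  · have hp : fftB_push [b0, b1, b2, b3, b4, b5] x = [b0, b1, b2, b3 ++ [x], b4, b5] := by
      simp [fftB_push, e3, List.modify]
    rw [hp, hfl]
    rw [fft_insertBy_skip _ _ b0 _ (fun y hy => hskip y (by rw [h0 y hy, e3]; omega)),
        fft_insertBy_skip _ _ b1 _ (fun y hy => hskip y (by rw [h1 y hy, e3]; omega)),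
        fft_insertBy_skip _ _ b2 _ (fun y hy => hskip y (by rw [h2 y hy, e3]; omega)),
        fft_insertBy_skip _ _ b3 _ (fun y hy => hskip y (by rw [h3 y hy, e3])),
        fft_insertBy_front _ _ _ (fun y hy => hfront y (by
          rw [e3]
          simp only [List.mem_append] at hy
          rcases hy with hy | hy
          · rw [h4 y hy]; omega
          · rw [h5 y hy]; omega))]
    simp
  by_cases e4 : fftB_idx x = 4
  · have hp : fftB_push [b0, b1, b2, b3, b4, b5] x = [b0, b1, b2, b3, b4 ++ [x], b5] := by
      simp [fftB_push, e4, List.modify]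
    rw [hp, hfl]
    rw [fft_insertBy_skip _ _ b0 _ (fun y hy => hskip y (by rw [h0 y hy, e4]; omega)),
        fft_insertBy_skip _ _ b1 _ (fun y hy => hskip y (by rw [h1 y hy, e4]; omega)),
        fft_insertBy_skip _ _ b2 _ (fun y hy => hskip y (by rw [h2 y hy, e4]; omega)),
        fft_insertBy_skip _ _ b3 _ (fun y hy => hskip y (by rw [h3 y hy, e4]; omega)),
        fft_insertBy_skip _ _ b4 _ (fun y hy => hskip y (by rw [h4 y hy, e4])),
        fft_insertBy_front _ _ _ (fun y hy => hfront y (by rw [e4, h5 y hy]; omega))]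
    simp
  have e5 : fftB_idx x = 5 := by omega
  have hp : fftB_push [b0, b1, b2, b3, b4, b5] x = [b0, b1, b2, b3, b4, b5 ++ [x]] := by
    simp [fftB_push, e5, List.modify]
  rw [hp, hfl]
  rw [fft_insertBy_skip _ _ b0 _ (fun y hy => hskip y (by rw [h0 y hy, e5]; omega)),
      fft_insertBy_skip _ _ b1 _ (fun y hy => hskip y (by rw [h1 y hy, e5]; omega)),
      fft_insertBy_skip _ _ b2 _ (fun y hy => hskip y (by rw [h2 y hy, e5]; omega)),
      fft_insertBy_skip _ _ b3 _ (fun y hy => hskip y (by rw [h3 y hy, e5]; omega)),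
      fft_insertBy_skip _ _ b4 _ (fun y hy => hskip y (by rw [h4 y hy, e5]; omega)),
      PySem.List.insertBy_of_forall_not_before _ _ b5 (fun y hy => hskip y (by rw [h5 y hy, e5]))]
  simp

set_option maxHeartbeats 1000000 in
-- the loop invariant: A's insertion-sort fold over the concatenation tracks B's bucket fold
lemma fft_foldl_inv (xs : List (List (String × String))) :
    ∀ b0 b1 b2 b3 b4 b5 : List (List (String × String)),
    (∀ y ∈ b0, fftB_idx y = 0) → (∀ y ∈ b1, fftB_idx y = 1) →
    (∀ y ∈ b2, fftB_idx y = 2) → (∀ y ∈ b3, fftB_idx y = 3) →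
    (∀ y ∈ b4, fftB_idx y = 4) → (∀ y ∈ b5, fftB_idx y = 5) →
    xs.foldl (fun acc x => PySem.List.insertBy (fun a c => decide (fftA_key a < fftA_key c)) x acc)
      ([b0, b1, b2, b3, b4, b5].flatten) = (xs.foldl fftB_push [b0, b1, b2, b3, b4, b5]).flatten := by
  induction xs with
  | nil => intro _ _ _ _ _ _ _ _ _ _ _ _; rfl
  | cons x t ih =>
    intro b0 b1 b2 b3 b4 b5 h0 h1 h2 h3 h4 h5
    have hle := fft_idx_le x
    simp only [List.foldl_cons]
    rw [fft_insert_concat b0 b1 b2 b3 b4 b5 x h0 h1 h2 h3 h4 h5]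
    by_cases e0 : fftB_idx x = 0
    · have hp : fftB_push [b0, b1, b2, b3, b4, b5] x = [b0 ++ [x], b1, b2, b3, b4, b5] := by
        simp [fftB_push, e0, List.modify]
      rw [hp]
      exact ih _ _ _ _ _ _ (fft_pure_append h0 e0) h1 h2 h3 h4 h5
    by_cases e1 : fftB_idx x = 1
    · have hp : fftB_push [b0, b1, b2, b3, b4, b5] x = [b0, b1 ++ [x], b2, b3, b4, b5] := by
        simp [fftB_push, e1, List.modify]
      rw [hp]
      exact ih _ _ _ _ _ _ h0 (fft_pure_append h1 e1) h2 h3 h4 h5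
    by_cases e2 : fftB_idx x = 2
    · have hp : fftB_push [b0, b1, b2, b3, b4, b5] x = [b0, b1, b2 ++ [x], b3, b4, b5] := by
        simp [fftB_push, e2, List.modify]
      rw [hp]
      exact ih _ _ _ _ _ _ h0 h1 (fft_pure_append h2 e2) h3 h4 h5
    by_cases e3 : fftB_idx x = 3
    · have hp : fftB_push [b0, b1, b2, b3, b4, b5] x = [b0, b1, b2, b3 ++ [x], b4, b5] := by
        simp [fftB_push, e3, List.modify]
      rw [hp]
      exact ih _ _ _ _ _ _ h0 h1 h2 (fft_pure_append h3 e3) h4 h5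
    by_cases e4 : fftB_idx x = 4
    · have hp : fftB_push [b0, b1, b2, b3, b4, b5] x = [b0, b1, b2, b3, b4 ++ [x], b5] := by
        simp [fftB_push, e4, List.modify]
      rw [hp]
      exact ih _ _ _ _ _ _ h0 h1 h2 h3 (fft_pure_append h4 e4) h5
    have e5 : fftB_idx x = 5 := by omega
    have hp : fftB_push [b0, b1, b2, b3, b4, b5] x = [b0, b1, b2, b3, b4, b5 ++ [x]] := by
      simp [fftB_push, e5, List.modify]
    rw [hp]
    exact ih _ _ _ _ _ _ h0 h1 h2 h3 h4 (fft_pure_append h5 e5)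

-- stability: A's sorted(findings, key=…) IS the concatenation of B's six buckets
lemma fft_sorted_eq_buckets (xs : List (List (String × String))) :
    PySem.List.sorted xs fftA_key false = (xs.foldl fftB_push [[], [], [], [], [], []]).flatten := by
  rw [PySem.List.sorted_eq_foldl_insertBy]
  have h := fft_foldl_inv xs [] [] [] [] [] []
    (by simp) (by simp) (by simp) (by simp) (by simp) (by simp)
  simpa using h

lemma fft_join_append (sep : List Char) (xs ys : List (List Char)) (hx : xs ≠ []) (hy : ys ≠ []) :
    PySem.Chars.join sep (xs ++ ys) = PySem.Chars.join sep xs ++ sep ++ PySem.Chars.join sep ys := by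
  induction xs with
  | nil => exact absurd rfl hx
  | cons p t ih =>
    cases t with
    | nil =>
      cases ys with
      | nil => exact absurd rfl hy
      | cons q u =>
        rw [List.singleton_append, PySem.Chars.join_cons_cons, PySem.Chars.join_singleton]
    | cons q t' =>
      rw [List.cons_append, List.cons_append, PySem.Chars.join_cons_cons]
      have ih' := ih (by simp)
      rw [List.cons_append] at ih'
      rw [ih', PySem.Chars.join_cons_cons]
      simp [List.append_assoc]

lemma fft_row_eq : fftA_row = fftB_row := rfl

-- ===== VERDICT (by name: the statement is the Claim_ definition above) =====
theorem format_findings_table_spec : Claim_equal_format_findings_table := by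
  unfold Claim_equal_format_findings_table
  intro findings _
  unfold Spec_format_findings_table
  cases findings with
  | nil => rfl
  | cons f t =>
    simp only [format_findings_table, format_findings_table_alt]
    rw [PySem.List.foldl_append_singleton_eq_map]
    have hrows : ((f :: t).foldl fftB_push [[], [], [], [], [], []]).flatMap
        (fun bucket => bucket.map fftB_row) =
        (PySem.List.sorted (f :: t) fftA_key false).map fftA_row := by
      rw [fft_sorted_eq_buckets, fft_row_eq]
      simp [List.flatMap, List.map_flatten]
    have hne : (PySem.List.sorted (f :: t) fftA_key false).map fftA_row ≠ [] := by
      simp [PySem.List.sorted_eq_nil_iff]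
    rw [hrows]
    congr 1
    generalize (PySem.List.sorted (f :: t) fftA_key false).map fftA_row = rows at hne
    cases rows with
    | nil => exact absurd rfl hne
    | cons r rs =>
      rw [show ([List.replicate 60 '=', "FINDINGS SUMMARY".toList, List.replicate 60 '='] ++
            (r :: rs) ++ [List.replicate 60 '='] ++
            ["Total: ".toList ++ PySem.Int.toChars ((f :: t).length : Int) ++ " findings".toList] :
            List (List Char)) =
          List.replicate 60 '=' :: "FINDINGS SUMMARY".toList :: List.replicate 60 '=' ::
            r :: (rs ++ [List.replicate 60 '=',
              "Total: ".toList ++ PySem.Int.toChars ((f :: t).length : Int) ++ " findings".toList]) by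
        simp]
      rw [PySem.Chars.join_cons_cons, PySem.Chars.join_cons_cons, PySem.Chars.join_cons_cons,
          ← List.cons_append,
          fft_join_append _ (r :: rs) _ (by simp) (by simp),
          PySem.Chars.join_cons_cons, PySem.Chars.join_singleton]
      simp only [List.append_assoc, List.cons_append, List.nil_append]
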